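-- pv_equiv track=rewrite | github.com/steeplejack/adventofcode | 2023/day12/solution_python/part2_failed_attempt1.py | compatible_positions_from_left
-- ===== SOURCE A (Python) =====
-- INF = 9223372036854775807
--
-- def compatible_positions_from_left(size, constraint):
--     """
--     Assume the piece being fitted is the first one in the constraint
--     This means that if it passes the first '#' in the string, no
--     more positions are compatible
--     """
--     if size == 0:
--         return []
--     first_x = INF
--     positions = []
--     for pos in range(len(constraint) - size + 1):
--         if constraint[pos] == '#' and pos < first_x:
--             first_x = pos
--         if pos > first_x:
--             return positions
--         if compatible_with(size, constraint, pos):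
--             positions.append(pos)
--     return positions
--
-- def compatible_with(size, constraint, pos):
--     """
--     ???????? - len = 8
--     .....### x pos=5, size=3, pos+size > len
--     """
--     constraint_length = len(constraint)
--     if size + pos > constraint_length:
--         return False
--     if pos > 0:
--         if constraint[pos - 1] == '#':
--             return False
--     if size + pos < constraint_length - 1:
--         if constraint[size+pos] == '#':
--             return False
--     for i in range(pos, pos+size):
--         if constraint[i] == '.':
--             return False
--     return True
-- ===== SOURCE B (Python) =====
-- def compatible_positions_from_left(size, constraint):
--     """Positions where the first block of length `size` can start.
--
--     Prefix sums of '.' give an O(1) emptiness test per window, and the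
--     first '#' is located once up front instead of being tracked with a
--     mutable sentinel inside the scan, so the result is one filter over
--     range(limit + 1).
--     """
--     if size == 0:
--         return []
--     n = len(constraint)
--     # dots[i] = number of '.' among constraint[:i]
--     dots = [0]
--     for c in constraint:
--         dots.append(dots[-1] + (c == '.'))
--     # the piece is the first block: nothing past the first '#' can be its start
--     limit = n - size
--     for i, c in enumerate(constraint):
--         if c == '#':
--             if i < limit:
--                 limit = i
--             break
--     return [pos for pos in range(limit + 1)
--             if dots[pos + size] - dots[pos] == 0
--             and (pos + size >= n or constraint[pos + size] != '#')]
-- ===== Notes on version B (the rewrite author's own statement) =====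
-- stated objective: faster
-- what changed: Replaces the sentinel-tracking scan with an O(size) rescan per position by one precomputed prefix-sum array of '.' (O(1) window test) plus a one-shot search for the first '#' that fixes the scan limit, so the answer is a single filter over range(limit+1); it also fixes A's off-by-one boundary check ('size+pos < len-1' instead of '< len').
-- intended difference: When the window ending at the second-to-last character is the first viable block and the last character is '#' (no '#' before position len-size-1, no '.' in constraint[len-size-1:len-1], constraint[-1]=='#'), A's boundary test 'size+pos < len(constraint)-1' skips the check of the character after the window and A wrongly includes position len-size-1; B excludes it, as a block there would merge with the trailing '#'. — e.g. on compatible_positions_from_left(1, ".?#"): A returns [1, 2], B returns [2]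
-- outside the precondition, e.g. on compatible_positions_from_left(-1, '#.'): A returns [0], B returns []
import Mathlib
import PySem

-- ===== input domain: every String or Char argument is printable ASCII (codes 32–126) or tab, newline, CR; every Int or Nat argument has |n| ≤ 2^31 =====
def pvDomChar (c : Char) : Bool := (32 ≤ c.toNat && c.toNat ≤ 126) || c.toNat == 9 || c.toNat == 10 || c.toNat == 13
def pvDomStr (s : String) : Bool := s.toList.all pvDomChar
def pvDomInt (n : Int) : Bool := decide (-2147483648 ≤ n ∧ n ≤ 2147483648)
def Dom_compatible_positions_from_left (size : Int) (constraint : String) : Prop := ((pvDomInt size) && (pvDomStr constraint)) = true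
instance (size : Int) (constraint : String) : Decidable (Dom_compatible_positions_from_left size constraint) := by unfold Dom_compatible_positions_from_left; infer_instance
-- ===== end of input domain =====

-- B replaces A's per-position O(size) rescan + mutable first-'#' sentinel by a prefix-sum array of '.'
-- and a one-shot search for the first '#' (one filter over the range); it also fixes A's off-by-one
-- right-boundary check (see D_ below).

-- s[i] for an index PROVEN in range by the surrounding guards (both Pythons index this way)
def pyCharAt (s : String) (i : Int) : Char := PySem.List.pyGetD s.toList i ' '

-- ===== PORT A =====
def pvINF : Int := 9223372036854775807

def compatible_with (size : Int) (constraint : String) (pos : Int) : Bool :=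
  let n : Int := (constraint.toList.length : Int)
  if size + pos > n then false
  else if pos > 0 && (pyCharAt constraint (pos - 1) == '#') then false
  else if size + pos < n - 1 && (pyCharAt constraint (size + pos) == '#') then false
  else (PySem.List.pyRange pos (pos + size) 1).all (fun i => !(pyCharAt constraint i == '.'))

def loopA (size : Int) (constraint : String) : List Int → Int → List Int → List Int
  | [], _, positions => positions
  | pos :: rest, firstX, positions =>
    let firstX' := if pyCharAt constraint pos == '#' && pos < firstX then pos else firstX
    if pos > firstX' then positions
    else loopA size constraint rest firstX'
      (positions ++ (if compatible_with size constraint pos then [pos] else []))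

def compatible_positions_from_left (size : Int) (constraint : String) : List Int :=
  if size == 0 then []
  else loopA size constraint
    (PySem.List.pyRange 0 ((constraint.toList.length : Int) - size + 1) 1) pvINF []

-- ===== PORT B =====
def bDots (constraint : String) : List Int :=
  constraint.toList.foldl
    (fun dots c => dots ++ [PySem.List.pyGetD dots (-1) 0 + (if c = '.' then 1 else 0)]) [0]

def bLimit : List Char → Int → Int → Int
  | [], _, limit => limit
  | c :: t, i, limit => if c = '#' then (if i < limit then i else limit) else bLimit t (i + 1) limit

def compatible_positions_from_left_alt (size : Int) (constraint : String) : List Int :=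
  if size == 0 then []
  else
    let l := constraint.toList
    let n : Int := (l.length : Int)
    let dots := bDots constraint
    let limit := bLimit l 0 (n - size)
    (PySem.List.pyRange 0 (limit + 1) 1).filter (fun pos =>
      (PySem.List.pyGetD dots (pos + size) 0 - PySem.List.pyGetD dots pos 0 == 0) &&
      (pos + size ≥ n || !(pyCharAt constraint (pos + size) == '#')))

-- ===== PRECONDITION & SPEC =====
-- Pre_ excludes (a) negative size — outside the natural domain: A then wraps around with negative
-- indices or raises IndexError — and (b) strings of length > 2^63-1, where A's INF sentinel would
-- silently stop the scan early (no runnable input reaches this; the proof uses the bound there).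
def Pre_compatible_positions_from_left (size : Int) (constraint : String) : Prop :=
  0 ≤ size ∧ (constraint.toList.length : Int) ≤ 9223372036854775807
instance (size : Int) (constraint : String) : Decidable (Pre_compatible_positions_from_left size constraint) := by
  unfold Pre_compatible_positions_from_left; infer_instance

def pvWitness_compatible_positions_from_left : Int × String := (1, "##")

-- A's right-boundary test 'size+pos < len-1' skips the character just after a window ending at the
-- second-to-last position: when the last char is '#', no '#' occurs before pos0 = len-size-1 and
-- constraint[pos0:len-1] has no '.', A wrongly includes pos0 while B excludes it (a block there
-- would merge with the trailing '#'), which is the intended behaviour.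
def D_compatible_positions_from_left (size : Int) (constraint : String) : Prop :=
  0 < size ∧ size < (constraint.toList.length : Int) ∧
  constraint.toList.getD (constraint.toList.length - 1) ' ' = '#' ∧
  (∀ i < constraint.toList.length - 1 - size.toNat, constraint.toList.getD i ' ' ≠ '#') ∧
  (∀ i < constraint.toList.length - 1,
      constraint.toList.length - 1 - size.toNat ≤ i → constraint.toList.getD i ' ' ≠ '.')
instance (size : Int) (constraint : String) : Decidable (D_compatible_positions_from_left size constraint) := by
  unfold D_compatible_positions_from_left; infer_instance

def Spec_compatible_positions_from_left (size : Int) (constraint : String) (out : List Int) : Prop :=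
  ¬ D_compatible_positions_from_left size constraint → out = compatible_positions_from_left_alt size constraint
instance (size : Int) (constraint : String) (out : List Int) : Decidable (Spec_compatible_positions_from_left size constraint out) := by
  unfold Spec_compatible_positions_from_left; infer_instance

def pvDiffWitness_compatible_positions_from_left : Int × String := (1, ".?#")
def pvDiffWitnessOut_compatible_positions_from_left : (List Int) × (List Int) := ([1, 2], [2])

-- ===== CLAIM (what is proved, stated in full; the proofs are below) =====
def Claim_unchanged_compatible_positions_from_left : Prop := ∀ (size : Int) (constraint : String), Dom_compatible_positions_from_left size constraint → Pre_compatible_positions_from_left size constraint → Spec_compatible_positions_from_left size constraint (compatible_positions_from_left size constraint)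
def Claim_changed_compatible_positions_from_left : Prop := Dom_compatible_positions_from_left (pvDiffWitness_compatible_positions_from_left.1) (pvDiffWitness_compatible_positions_from_left.2) ∧ Pre_compatible_positions_from_left (pvDiffWitness_compatible_positions_from_left.1) (pvDiffWitness_compatible_positions_from_left.2) ∧ D_compatible_positions_from_left (pvDiffWitness_compatible_positions_from_left.1) (pvDiffWitness_compatible_positions_from_left.2) ∧ compatible_positions_from_left (pvDiffWitness_compatible_positions_from_left.1) (pvDiffWitness_compatible_positions_from_left.2) = pvDiffWitnessOut_compatible_positions_from_left.1 ∧ compatible_positions_from_left_alt (pvDiffWitness_compatible_positions_from_left.1) (pvDiffWitness_compatible_positions_from_left.2) = pvDiffWitnessOut_compatible_positions_from_left.2 ∧ pvDiffWitnessOut_compatible_positions_from_left.1 ≠ pvDiffWitnessOut_compatible_positions_from_left.2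
def Claim_exact_compatible_positions_from_left : Prop := ∀ (size : Int) (constraint : String), Dom_compatible_positions_from_left size constraint → Pre_compatible_positions_from_left size constraint → D_compatible_positions_from_left size constraint → compatible_positions_from_left size constraint ≠ compatible_positions_from_left_alt size constraint

-- ===== LEMMAS AND PROOFS =====

-- index of the first '#' as A's INF sentinel ends up recording it (INF when there is none)
def fHash (l : List Char) : Int :=
  match l.findIdx? (fun c => c == '#') with
  | some f => (f : Int)
  | none => pvINF

theorem bool_ext (a b : Bool) (h : a = true ↔ b = true) : a = b := by
  cases a <;> cases b <;> simp_all

theorem fHash_some (l : List Char) (f : Nat) (h : l.findIdx? (fun c => c == '#') = some f) :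
    fHash l = (f : Int) := by
  unfold fHash; rw [h]

theorem fHash_none (l : List Char) (h : l.findIdx? (fun c => c == '#') = none) :
    fHash l = pvINF := by
  unfold fHash; rw [h]

theorem fHash_not_hash (l : List Char) (i : Nat) (hi : i < l.length) (h : (i : Int) < fHash l) :
    l.getD i ' ' ≠ '#' := by
  rcases h' : l.findIdx? (fun c => c == '#') with _ | f
  · have hnone := List.findIdx?_eq_none_iff.mp h'
    have hm : l[i] ∈ l := List.getElem_mem hi
    have := hnone _ hm
    rw [List.getD_eq_getElem l ' ' hi]
    simpa using this
  · obtain ⟨hf, _, hj⟩ := List.findIdx?_eq_some_iff_getElem.mp h'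
    have hif : i < f := by
      rw [fHash_some l f h'] at h; exact_mod_cast h
    have := hj i hif
    rw [List.getD_eq_getElem l ' ' hi]
    simpa using this

theorem fHash_hash (l : List Char) (f : Nat) (h : l.findIdx? (fun c => c == '#') = some f) :
    f < l.length ∧ l.getD f ' ' = '#' := by
  obtain ⟨hf, hp, _⟩ := List.findIdx?_eq_some_iff_getElem.mp h
  refine ⟨hf, ?_⟩
  rw [List.getD_eq_getElem l ' ' hf]
  simpa using hp

theorem fHash_find (l : List Char) (p : Nat) (hp : p < l.length)
    (hall : ∀ i < p, l.getD i ' ' ≠ '#') (hp2 : l.getD p ' ' = '#') :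
    l.findIdx? (fun c => c == '#') = some p := by
  refine List.findIdx?_eq_some_iff_getElem.mpr ⟨hp, ?_, ?_⟩
  · rw [List.getD_eq_getElem l ' ' hp] at hp2; simpa using hp2
  · intro j hj
    have := hall j hj
    rw [List.getD_eq_getElem l ' ' (by omega)] at this
    simpa using this

theorem fHash_ge (l : List Char) (p : Nat) (hp : p ≤ l.length)
    (hlen : (l.length : Int) ≤ pvINF) (hall : ∀ i < p, l.getD i ' ' ≠ '#') :
    (p : Int) ≤ fHash l := by
  rcases h : l.findIdx? (fun c => c == '#') with _ | f
  · rw [fHash_none l h]; unfold pvINF at *; omega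
  · rw [fHash_some l f h]
    obtain ⟨hf, hc⟩ := fHash_hash l f h
    by_contra hlt
    have hfp : f < p := by omega
    exact hall f hfp hc

-- ---- B's limit loop ----

theorem bLimit_eq (l : List Char) (j lim : Int) :
    bLimit l j lim = match l.findIdx? (fun c => c == '#') with
      | some f => if j + (f : Int) < lim then j + f else lim
      | none => lim := by
  induction l generalizing j with
  | nil => simp [bLimit]
  | cons c t ih =>
    by_cases hc : c = '#'
    · simp [bLimit, hc, List.findIdx?_cons]
    · rw [List.findIdx?_cons]
      have hcb : (c == '#') = false := by simpa using hc
      rw [hcb]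
      simp only [Bool.false_eq_true, if_false]
      show bLimit (c :: t) j lim = _
      rw [show bLimit (c :: t) j lim = bLimit t (j + 1) lim by simp [bLimit, hc]]
      rw [ih (j + 1)]
      rcases h : t.findIdx? (fun c => c == '#') with _ | f
      · simp
      · simp only [Option.map_some]
        have heq : j + 1 + (f : Int) = j + (((f : Nat) + 1 : Nat) : Int) := by push_cast; ring
        rw [heq]

theorem bLimit_min (l : List Char) (N : Int) (hN : N ≤ pvINF) :
    bLimit l 0 N = min N (fHash l) := by
  rw [bLimit_eq]
  rcases h : l.findIdx? (fun c => c == '#') with _ | f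
  · simp only [fHash_none l h]
    unfold pvINF at *; omega
  · simp only [fHash_some l f h, zero_add]
    split_ifs <;> omega

-- ---- B's prefix-sum list ----

def dAux : List Char → Int → List Int
  | [], _ => []
  | c :: t, a => (a + (if c = '.' then 1 else 0)) :: dAux t (a + (if c = '.' then 1 else 0))

theorem bDots_fold (l : List Char) (D : List Int) (a : Int) (h : D.getLast? = some a) :
    l.foldl (fun dots c => dots ++ [PySem.List.pyGetD dots (-1) 0 + (if c = '.' then 1 else 0)]) D
      = D ++ dAux l a := by
  induction l generalizing D a with
  | nil => simp [dAux]
  | cons c t ih =>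
    have hne : D ≠ [] := by rintro rfl; simp at h
    have hlast : PySem.List.pyGetD D (-1) 0 = a := by
      rw [PySem.List.pyGetD_neg_one D 0 hne]
      have hg := List.getLast?_eq_some_getLast hne
      rw [hg] at h
      exact Option.some.inj h
    rw [List.foldl_cons, hlast,
        ih (D ++ [a + (if c = '.' then 1 else 0)]) (a + (if c = '.' then 1 else 0))
          List.getLast?_concat, List.append_assoc]
    rfl

theorem bDots_eq (constraint : String) :
    bDots constraint = 0 :: dAux constraint.toList 0 := by
  unfold bDots
  rw [bDots_fold _ [0] 0 rfl]
  rfl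

theorem dAux_getD (l : List Char) (a : Int) (i : Nat) (h : i ≤ l.length) :
    (a :: dAux l a).getD i 0 = a + ((l.take i).countP (fun c => c == '.') : Int) := by
  induction l generalizing a i with
  | nil =>
    have h0 : i = 0 := by simpa using h
    subst h0; simp
  | cons c t ih =>
    cases i with
    | zero => simp
    | succ i =>
      have hi : i ≤ t.length := by simpa using h
      show (dAux (c :: t) a).getD i 0 = _
      rw [show dAux (c :: t) a
            = (a + (if c = '.' then 1 else 0)) :: dAux t (a + (if c = '.' then 1 else 0)) from rfl]
      rw [ih _ i hi]
      rw [List.take_succ_cons, List.countP_cons]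
      by_cases hc : c = '.'
      · simp only [hc, if_true, beq_self_eq_true, if_true]
        push_cast; ring
      · have hcb : (c == '.') = false := by simpa using hc
        simp only [hc, if_false, hcb, Bool.false_eq_true]
        simp

-- ---- the window test, as both programs decide it ----

theorem count_window (l : List Char) (p s : Nat) (h : p + s ≤ l.length) :
    (((l.take (p + s)).countP (fun c => c == '.') : Int)
        - ((l.take p).countP (fun c => c == '.') : Int) = 0)
      ↔ ∀ k < s, l.getD (p + k) ' ' ≠ '.' := by
  rw [List.take_add, List.countP_append]
  have hz : ((((l.take p).countP (fun c => c == '.')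
        + ((l.drop p).take s).countP (fun c => c == '.') : Nat) : Int)
        - ((l.take p).countP (fun c => c == '.') : Int) = 0)
      ↔ ((l.drop p).take s).countP (fun c => c == '.') = 0 := by omega
  rw [hz, List.countP_eq_zero]
  have hlen : ((l.drop p).take s).length = s := by
    simp only [List.length_take, List.length_drop]; omega
  constructor
  · intro hall k hk
    have hk2 : k < ((l.drop p).take s).length := by omega
    have hmem : ((l.drop p).take s)[k] ∈ (l.drop p).take s := List.getElem_mem hk2
    have := hall _ hmem
    rw [List.getElem_take, List.getElem_drop] at this
    rw [List.getD_eq_getElem l ' ' (by omega)]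
    simpa using this
  · intro hall x hx
    obtain ⟨k, hk, rfl⟩ := List.getElem_of_mem hx
    have hks : k < s := by omega
    have := hall k hks
    rw [List.getD_eq_getElem l ' ' (by omega)] at this
    rw [List.getElem_take, List.getElem_drop]
    simpa using this

theorem all_window (constraint : String) (p s : Nat) (_h : p + s ≤ constraint.toList.length) :
    ((PySem.List.pyRange (p : Int) ((p : Int) + (s : Int)) 1).all
        (fun i => !(pyCharAt constraint i == '.')) = true)
      ↔ ∀ k < s, constraint.toList.getD (p + k) ' ' ≠ '.' := by
  rw [List.all_eq_true]
  constructor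
  · intro hall k hk
    have hmem : ((p : Int) + (k : Int)) ∈ PySem.List.pyRange (p : Int) ((p : Int) + (s : Int)) 1 := by
      rw [PySem.List.mem_pyRange_one]
      constructor <;> [omega; (push_cast; omega)]
    have := hall _ hmem
    rw [show (p : Int) + (k : Int) = ((p + k : Nat) : Int) by push_cast; ring] at this
    simp only [pyCharAt, PySem.List.pyGetD_natCast] at this
    simpa using this
  · intro hall i hi
    rw [PySem.List.mem_pyRange_one] at hi
    have hk : i = ((p + (i - p).toNat : Nat) : Int) := by push_cast; omega
    have hks : (i - p).toNat < s := by omega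
    have := hall _ hks
    rw [hk]
    simp only [pyCharAt, PySem.List.pyGetD_natCast]
    simpa using this

theorem dots_window (constraint : String) (p s : Nat)
    (h : p + s ≤ constraint.toList.length) :
    (PySem.List.pyGetD (bDots constraint) ((p : Int) + (s : Int)) 0
        - PySem.List.pyGetD (bDots constraint) (p : Int) 0 = 0)
      ↔ ∀ k < s, constraint.toList.getD (p + k) ' ' ≠ '.' := by
  rw [bDots_eq]
  rw [show (p : Int) + (s : Int) = ((p + s : Nat) : Int) by push_cast; ring]
  rw [PySem.List.pyGetD_natCast, PySem.List.pyGetD_natCast]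
  rw [dAux_getD _ _ _ h, dAux_getD _ _ _ (by omega)]
  rw [show (0 : Int) + ((constraint.toList.take (p + s)).countP (fun c => c == '.') : Int)
        - (0 + ((constraint.toList.take p).countP (fun c => c == '.') : Int))
      = ((constraint.toList.take (p + s)).countP (fun c => c == '.') : Int)
        - ((constraint.toList.take p).countP (fun c => c == '.') : Int) by ring]
  exact count_window _ _ _ h

-- ---- A's loop ----

theorem loopA_done (size : Int) (constraint : String) (q b f : Int) (acc : List Int)
    (hf : f < q) :
    loopA size constraint (PySem.List.pyRange q b 1) f acc = acc := by
  rcases (by omega : b ≤ q ∨ q < b) with hb | hb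
  · rw [PySem.List.pyRange_one_eq_nil hb]; rfl
  · rw [PySem.List.pyRange_one_cons hb]
    simp only [loopA]
    have h1 : decide (q < f) = false := by simp only [decide_eq_false_iff_not]; omega
    rw [h1, Bool.and_false]
    simp only [Bool.false_eq_true, if_false]
    rw [if_pos (by omega : q > f)]

theorem loopA_empty (size : Int) (constraint : String) (p top : Int) (acc : List Int)
    (hp : top ≤ p) (F : Int → Bool) (lim : Int) (hlim : lim + 1 ≤ top) :
    loopA size constraint (PySem.List.pyRange p top 1) pvINF acc
      = acc ++ (PySem.List.pyRange p (lim + 1) 1).filter F := by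
  rw [PySem.List.pyRange_one_eq_nil hp, PySem.List.pyRange_one_eq_nil (by omega)]
  simp [loopA]

theorem loopA_filter (size : Int) (constraint : String) (hs : 1 ≤ size)
    (hn : (constraint.toList.length : Int) ≤ pvINF) :
    ∀ (k : Nat) (p : Nat) (acc : List Int), constraint.toList.length - p ≤ k →
      (∀ i < p, constraint.toList.getD i ' ' ≠ '#') →
      loopA size constraint
          (PySem.List.pyRange (p : Int) ((constraint.toList.length : Int) - size + 1) 1) pvINF acc
        = acc ++ (PySem.List.pyRange (p : Int)
              (min ((constraint.toList.length : Int) - size) (fHash constraint.toList) + 1) 1).filter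
            (fun pos => compatible_with size constraint pos) := by
  intro k
  induction k with
  | zero =>
    intro p acc hk _
    refine loopA_empty size constraint _ _ acc (by omega) _ _ ?_
    have := min_le_left ((constraint.toList.length : Int) - size) (fHash constraint.toList)
    omega
  | succ k ih =>
    intro p acc hk hall
    by_cases hpN : (p : Int) ≤ (constraint.toList.length : Int) - size
    · have hpn : p < constraint.toList.length := by omega
      rw [PySem.List.pyRange_one_cons (by omega : (p : Int) < (constraint.toList.length : Int) - size + 1)]
      simp only [loopA]
      have hchar : pyCharAt constraint (p : Int) = constraint.toList.getD p ' ' := by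
        simp [pyCharAt, PySem.List.pyGetD_natCast]
      by_cases hp2 : constraint.toList.getD p ' ' = '#'
      · have hfind : constraint.toList.findIdx? (fun c => c == '#') = some p :=
          fHash_find constraint.toList p hpn hall hp2
        have hfH : fHash constraint.toList = (p : Int) := fHash_some constraint.toList p hfind
        have hcond : (pyCharAt constraint (p : Int) == '#' && decide ((p : Int) < pvINF)) = true := by
          rw [hchar, hp2]
          simp only [beq_self_eq_true, Bool.true_and, decide_eq_true_eq]
          unfold pvINF at *; omega
        rw [hcond]
        simp only [if_true]
        rw [if_neg (by omega : ¬ (p : Int) > (p : Int))]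
        rw [loopA_done size constraint ((p : Int) + 1) _ (p : Int) _ (by omega)]
        rw [hfH, min_eq_right hpN]
        rw [PySem.List.pyRange_one_singleton]
        rcases Bool.eq_false_or_eq_true (compatible_with size constraint (p : Int)) with hcw | hcw <;>
          simp [List.filter, hcw]
      · have hcond1 : (pyCharAt constraint (p : Int) == '#') = false := by
          rw [hchar]
          simp only [beq_eq_false_iff_ne, ne_eq]
          exact hp2
        have hcond : (pyCharAt constraint (p : Int) == '#' && decide ((p : Int) < pvINF)) = false := by
          rw [hcond1, Bool.false_and]
        rw [hcond]
        simp only [Bool.false_eq_true, if_false]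
        rw [if_neg (by unfold pvINF at *; omega : ¬ (p : Int) > pvINF)]
        have hall' : ∀ i < p + 1, constraint.toList.getD i ' ' ≠ '#' := by
          intro i hi
          rcases Nat.lt_succ_iff_lt_or_eq.mp hi with h | h
          · exact hall i h
          · subst h; exact hp2
        have hrec := ih (p + 1)
          (acc ++ (if compatible_with size constraint (p : Int) then [(p : Int)] else []))
          (by omega) hall'
        rw [show ((p : Int) + 1) = ((p + 1 : Nat) : Int) by push_cast; ring]
        rw [hrec]
        have hge : ((p + 1 : Nat) : Int) ≤ fHash constraint.toList :=
          fHash_ge constraint.toList (p + 1) (by omega) hn hall'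
        have hcons : PySem.List.pyRange (p : Int)
              (min ((constraint.toList.length : Int) - size) (fHash constraint.toList) + 1) 1
            = (p : Int) :: PySem.List.pyRange ((p : Int) + 1)
              (min ((constraint.toList.length : Int) - size) (fHash constraint.toList) + 1) 1 := by
          apply PySem.List.pyRange_one_cons
          have h1 : (p : Int) ≤ min ((constraint.toList.length : Int) - size) (fHash constraint.toList) := by
            apply le_min hpN
            push_cast at hge
            omega
          omega
        rw [show ((p : Int) + 1) = ((p + 1 : Nat) : Int) by push_cast; ring] at hcons
        rw [hcons, List.filter_cons]
        rcases Bool.eq_false_or_eq_true (compatible_with size constraint (p : Int)) with hcw | hcw <;>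
          simp [hcw, List.append_assoc]
    · refine loopA_empty size constraint _ _ acc (by omega) _ _ ?_
      have := min_le_left ((constraint.toList.length : Int) - size) (fHash constraint.toList)
      omega

-- ---- closed forms of the two ports (size ≥ 1, length ≤ INF) ----

theorem A_char (size : Int) (constraint : String) (hs : 1 ≤ size)
    (hn : (constraint.toList.length : Int) ≤ pvINF) :
    compatible_positions_from_left size constraint
      = (PySem.List.pyRange 0
            (min ((constraint.toList.length : Int) - size) (fHash constraint.toList) + 1) 1).filter
          (fun pos => compatible_with size constraint pos) := by
  unfold compatible_positions_from_left
  rw [if_neg (by simp only [beq_iff_eq]; omega)]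
  have h0 := loopA_filter size constraint hs hn constraint.toList.length 0 [] (by omega) (by omega)
  simpa using h0

theorem B_char (size : Int) (constraint : String) (hs : 1 ≤ size)
    (hn : (constraint.toList.length : Int) ≤ pvINF) :
    compatible_positions_from_left_alt size constraint
      = (PySem.List.pyRange 0
            (min ((constraint.toList.length : Int) - size) (fHash constraint.toList) + 1) 1).filter
          (fun pos =>
            (PySem.List.pyGetD (bDots constraint) (pos + size) 0
                - PySem.List.pyGetD (bDots constraint) pos 0 == 0) &&
            (decide (pos + size ≥ (constraint.toList.length : Int))
              || !(pyCharAt constraint (pos + size) == '#'))) := by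
  unfold compatible_positions_from_left_alt
  rw [if_neg (by simp only [beq_iff_eq]; omega)]
  dsimp only
  rw [bLimit_min constraint.toList ((constraint.toList.length : Int) - size) (by omega)]

-- ---- the pointwise comparison ----

theorem pointwise (size : Int) (constraint : String) (hs : 1 ≤ size)
    (_hn : (constraint.toList.length : Int) ≤ pvINF)
    (hnd : ¬ D_compatible_positions_from_left size constraint)
    (p : Nat) (hpN : (p : Int) ≤ (constraint.toList.length : Int) - size)
    (hpf : (p : Int) ≤ fHash constraint.toList) :
    compatible_with size constraint (p : Int)
      = ((PySem.List.pyGetD (bDots constraint) ((p : Int) + size) 0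
            - PySem.List.pyGetD (bDots constraint) (p : Int) 0 == 0) &&
         (decide ((p : Int) + size ≥ (constraint.toList.length : Int))
            || !(pyCharAt constraint ((p : Int) + size) == '#'))) := by
  have hss : (size.toNat : Int) = size := by omega
  have hps : p + size.toNat ≤ constraint.toList.length := by omega
  have hwinA : ((PySem.List.pyRange (p : Int) ((p : Int) + size) 1).all
        (fun i => !(pyCharAt constraint i == '.')) = true)
      ↔ ∀ k < size.toNat, constraint.toList.getD (p + k) ' ' ≠ '.' := by
    rw [show (p : Int) + size = (p : Int) + (size.toNat : Int) by omega]
    exact all_window constraint p size.toNat hps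
  have hwinB : (PySem.List.pyGetD (bDots constraint) ((p : Int) + size) 0
        - PySem.List.pyGetD (bDots constraint) (p : Int) 0 = 0)
      ↔ ∀ k < size.toNat, constraint.toList.getD (p + k) ' ' ≠ '.' := by
    rw [show (p : Int) + size = (p : Int) + (size.toNat : Int) by omega]
    exact dots_window constraint p size.toNat hps
  have hdotsEq : ((PySem.List.pyGetD (bDots constraint) ((p : Int) + size) 0
        - PySem.List.pyGetD (bDots constraint) (p : Int) 0 == 0) = true)
      ↔ (PySem.List.pyGetD (bDots constraint) ((p : Int) + size) 0
        - PySem.List.pyGetD (bDots constraint) (p : Int) 0 = 0) := by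
    simp
  unfold compatible_with
  rw [if_neg (by omega : ¬ size + (p : Int) > (constraint.toList.length : Int))]
  have hleft : (decide ((p : Int) > 0) && (pyCharAt constraint ((p : Int) - 1) == '#')) = false := by
    rcases Nat.eq_zero_or_pos p with h0 | h0
    · subst h0; simp
    · have hca : pyCharAt constraint ((p : Int) - 1) = constraint.toList.getD (p - 1) ' ' := by
        have hc1 : (p : Int) - 1 = ((p - 1 : Nat) : Int) := by omega
        rw [pyCharAt, hc1, PySem.List.pyGetD_natCast]
      have hne : constraint.toList.getD (p - 1) ' ' ≠ '#' := by
        apply fHash_not_hash constraint.toList (p - 1) (by omega)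
        omega
      have hb : (pyCharAt constraint ((p : Int) - 1) == '#') = false := by
        rw [hca]
        simp only [beq_eq_false_iff_ne, ne_eq]
        exact hne
      rw [hb, Bool.and_false]
  rw [hleft]
  simp only [Bool.false_eq_true, if_false]
  rw [show size + (p : Int) = (p : Int) + size by ring]
  by_cases hend : (p : Int) + size = (constraint.toList.length : Int)
  · have hc3 : decide ((p : Int) + size < (constraint.toList.length : Int) - 1) = false := by
      simp only [decide_eq_false_iff_not]; omega
    rw [hc3, Bool.false_and]
    simp only [Bool.false_eq_true, if_false]
    have hge : decide ((p : Int) + size ≥ (constraint.toList.length : Int)) = true := by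
      simp only [decide_eq_true_eq]; omega
    rw [hge, Bool.true_or, Bool.and_true]
    apply bool_ext
    rw [hwinA, hdotsEq]
    exact hwinB.symm
  · have hlt : (p : Int) + size < (constraint.toList.length : Int) := by omega
    have hca : pyCharAt constraint ((p : Int) + size)
        = constraint.toList.getD (p + size.toNat) ' ' := by
      have hc1 : (p : Int) + size = ((p + size.toNat : Nat) : Int) := by omega
      rw [pyCharAt, hc1, PySem.List.pyGetD_natCast]
    have hgef : decide ((p : Int) + size ≥ (constraint.toList.length : Int)) = false := by
      simp only [decide_eq_false_iff_not]; omega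
    rw [hgef, Bool.false_or]
    by_cases hch : constraint.toList.getD (p + size.toNat) ' ' = '#'
    · have hcb : (pyCharAt constraint ((p : Int) + size) == '#') = true := by
        rw [hca, hch]; simp
      rw [hcb]
      simp only [Bool.not_true, Bool.and_false]
      by_cases hmid : (p : Int) + size < (constraint.toList.length : Int) - 1
      · have hc3 : decide ((p : Int) + size < (constraint.toList.length : Int) - 1) = true := by
          simp only [decide_eq_true_eq]; omega
        rw [hc3]
        simp only [Bool.and_true, if_true]
      · -- the off-by-one corner: p + size = length - 1 and the char after the window is '#'
        have hc3 : decide ((p : Int) + size < (constraint.toList.length : Int) - 1) = false := by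
          simp only [decide_eq_false_iff_not]; omega
        rw [hc3]
        simp only [Bool.false_and, Bool.false_eq_true, if_false]
        cases hA : ((PySem.List.pyRange (p : Int) ((p : Int) + size) 1).all
            (fun i => !(pyCharAt constraint i == '.'))) with
        | false => rfl
        | true =>
          exfalso
          apply hnd
          have hW := hwinA.mp hA
          have hsn : size < (constraint.toList.length : Int) := by omega
          have hpeq : p + size.toNat = constraint.toList.length - 1 := by omega
          refine ⟨by omega, hsn, ?_, ?_, ?_⟩
          · rw [← hpeq]; exact hch
          · intro i hi
            apply fHash_not_hash constraint.toList i (by omega)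
            have hip : i < p := by omega
            omega
          · intro i hi1 hi2
            have hk : i = p + (i - p) := by omega
            rw [hk]
            exact hW (i - p) (by omega)
    · have hcb : (pyCharAt constraint ((p : Int) + size) == '#') = false := by
        rw [hca]
        simp only [beq_eq_false_iff_ne, ne_eq]
        exact hch
      rw [hcb]
      simp only [Bool.not_false, Bool.and_true, Bool.and_false, Bool.false_eq_true, if_false]
      apply bool_ext
      rw [hwinA, hdotsEq]
      exact hwinB.symm

-- ===== VERDICT (by name: the statement is the Claim_ definition above) =====
theorem compatible_positions_from_left_spec : Claim_unchanged_compatible_positions_from_left := by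
  intro size constraint hdom hpre
  unfold Spec_compatible_positions_from_left
  intro hnd
  obtain ⟨hs0, hlen⟩ := hpre
  by_cases hsz : size = 0
  · subst hsz
    unfold compatible_positions_from_left compatible_positions_from_left_alt
    simp
  · have hs : 1 ≤ size := by omega
    rw [A_char size constraint hs hlen, B_char size constraint hs hlen]
    apply List.filter_congr
    intro pos hmem
    rw [PySem.List.mem_pyRange_one] at hmem
    obtain ⟨h0, hlt⟩ := hmem
    have hple : pos ≤ min ((constraint.toList.length : Int) - size) (fHash constraint.toList) := by
      omega
    have hp : pos = ((pos.toNat : Nat) : Int) := by omega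
    rw [hp]
    exact pointwise size constraint hs hlen hnd pos.toNat (by omega) (by omega)

theorem compatible_positions_from_left_changed : Claim_changed_compatible_positions_from_left := by
  unfold Claim_changed_compatible_positions_from_left; decide

theorem compatible_positions_from_left_tight : Claim_exact_compatible_positions_from_left := by
  intro size constraint hdom hpre hD
  obtain ⟨hs0, hlen⟩ := hpre
  obtain ⟨hs1, hsn, hlast, hno, hwin⟩ := hD
  have hs : 1 ≤ size := by omega
  have hn2 : 2 ≤ constraint.toList.length := by omega
  set p0 : Nat := constraint.toList.length - 1 - size.toNat with hp0
  have hp0s : p0 + size.toNat = constraint.toList.length - 1 := by omega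
  have hp0f : ((p0 : Nat) : Int) ≤ fHash constraint.toList := by
    apply fHash_ge constraint.toList p0 (by omega) hlen
    intro i hi
    exact hno i (by omega)
  intro hAB
  have hcw : compatible_with size constraint ((p0 : Nat) : Int) = true := by
    unfold compatible_with
    rw [if_neg (by omega : ¬ size + ((p0 : Nat) : Int) > (constraint.toList.length : Int))]
    have hleft : (decide (((p0 : Nat) : Int) > 0)
        && (pyCharAt constraint (((p0 : Nat) : Int) - 1) == '#')) = false := by
      rcases Nat.eq_zero_or_pos p0 with h0 | h0
      · rw [h0]; simp
      · have hca : pyCharAt constraint (((p0 : Nat) : Int) - 1)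
            = constraint.toList.getD (p0 - 1) ' ' := by
          have hc1 : ((p0 : Nat) : Int) - 1 = ((p0 - 1 : Nat) : Int) := by omega
          rw [pyCharAt, hc1, PySem.List.pyGetD_natCast]
        have hb : (pyCharAt constraint (((p0 : Nat) : Int) - 1) == '#') = false := by
          rw [hca]
          simp only [beq_eq_false_iff_ne, ne_eq]
          exact hno (p0 - 1) (by omega)
        rw [hb, Bool.and_false]
    rw [hleft]
    simp only [Bool.false_eq_true, if_false]
    have hc3 : decide (size + ((p0 : Nat) : Int) < (constraint.toList.length : Int) - 1) = false := by
      simp only [decide_eq_false_iff_not]; omega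
    rw [hc3, Bool.false_and]
    simp only [Bool.false_eq_true, if_false]
    rw [show ((p0 : Nat) : Int) + size = ((p0 : Nat) : Int) + ((size.toNat : Nat) : Int) by omega]
    exact (all_window constraint p0 size.toNat (by omega)).mpr
      (fun k hk => hwin (p0 + k) (by omega) (by omega))
  have hmemA : ((p0 : Nat) : Int) ∈ compatible_positions_from_left size constraint := by
    rw [A_char size constraint hs hlen]
    rw [List.mem_filter]
    refine ⟨?_, hcw⟩
    rw [PySem.List.mem_pyRange_one]
    constructor
    · omega
    · have hmin : ((p0 : Nat) : Int) ≤ min ((constraint.toList.length : Int) - size)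
          (fHash constraint.toList) := by
        apply le_min _ hp0f
        omega
      omega
  rw [hAB, B_char size constraint hs hlen, List.mem_filter] at hmemA
  have hcond := hmemA.2
  rw [Bool.and_eq_true] at hcond
  have h2 := hcond.2
  have hca : pyCharAt constraint (((p0 : Nat) : Int) + size)
      = constraint.toList.getD (constraint.toList.length - 1) ' ' := by
    have hc1 : ((p0 : Nat) : Int) + size = ((constraint.toList.length - 1 : Nat) : Int) := by omega
    rw [pyCharAt, hc1, PySem.List.pyGetD_natCast]
  rw [Bool.or_eq_true] at h2
  rcases h2 with h2 | h2
  · simp only [decide_eq_true_eq] at h2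
    omega
  · rw [hca, hlast] at h2
    simp at h2
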